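-- pv_equiv track=rewrite | github.com/ayoubc/competitive-programming | online_judges/codechef/POSPREFS.py | solve
-- ===== SOURCE A (Python) =====
-- def solve(k, n):
--     ans = list(range(1, n+1))
--     for i in range(n):
--         if i % 2 != 1:
--             ans[i] *= -1
--
--     pre = [0 for i in range(n)]
--     pre[0] = ans[0]
--     for i in range(1, n):
--         pre[i] += ans[i] + pre[i - 1]
--     cnt = n // 2
--     for i in range(n-1, -1, -1):
--         if cnt == k:
--             break
--         elif cnt > k:
--             if pre[i] > 0 and ans[i] > 0:
--                 ans[i] *= -1
--                 cnt -= 1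
--         else:
--             if pre[i] <= 0 and ans[i] < 0:
--                 ans[i] *= -1
--                 cnt += 1
--     return ans
-- ===== SOURCE B (Python) =====
-- def solve(k, n):
--     # Closed form: base sign pattern is -,+,-,+,...; n//2 odd positions are positive.
--     # A's backward scan flips the highest odd positions to negative when k is short,
--     # or the highest even positions to positive when k is large. Compute the cut directly.
--     m = n // 2            # number of odd indices (inherently positive prefixes)
--     e = (n + 1) // 2      # number of even indices
--     pos_odd = m if k >= m else max(k, 0)       # odd ranks [0, pos_odd) stay positive
--     pos_even = min(k, n) - m if k > m else 0   # even ranks [e - pos_even, e) become positive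
--     return [(p + 1) if (p % 2 == 1 and p // 2 < pos_odd) or
--                        (p % 2 == 0 and p // 2 >= e - pos_even)
--             else -(p + 1)
--             for p in range(n)]
-- ===== Notes on version B (the rewrite author's own statement) =====
-- stated objective: simpler
-- what changed: Replaced A's materialized base array, prefix-sum array and stateful backward flipping scan by a single comprehension computing each entry's sign from a closed-form rule (how many odd/even positions stay positive follows directly from k and n//2).
import Mathlib
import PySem

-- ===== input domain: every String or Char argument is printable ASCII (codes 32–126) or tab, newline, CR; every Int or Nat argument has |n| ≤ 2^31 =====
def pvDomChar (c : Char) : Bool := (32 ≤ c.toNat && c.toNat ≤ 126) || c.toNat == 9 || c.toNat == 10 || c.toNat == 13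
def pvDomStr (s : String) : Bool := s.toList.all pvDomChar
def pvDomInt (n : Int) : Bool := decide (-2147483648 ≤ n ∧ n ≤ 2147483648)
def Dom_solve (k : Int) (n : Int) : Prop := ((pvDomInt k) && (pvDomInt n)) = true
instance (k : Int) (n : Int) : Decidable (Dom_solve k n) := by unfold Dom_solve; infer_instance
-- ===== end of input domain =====

-- B replaces A's prefix-sum array and conditional backward flipping scan by a
-- direct closed-form sign rule per index (objective: simpler).

-- ===== PORT A =====
-- ans after the first loop: -1, 2, -3, 4, ...
def aAns (n : Int) : List Int :=
  (PySem.List.pyRange 0 n 1).foldl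
    (fun a i => if PySem.Int.mod i 2 ≠ 1 then
        PySem.List.pySetD a i (PySem.List.pyGetD a i 0 * -1) else a)
    (PySem.List.pyRange 1 (n + 1) 1)

-- pre: the prefix-sum array of ans (pre[0] = ans[0], pre[i] = ans[i] + pre[i-1])
def aPre (n : Int) : List Int :=
  (PySem.List.pyRange 1 n 1).foldl
    (fun p i => PySem.List.pySetD p i
      (PySem.List.pyGetD p i 0 + (PySem.List.pyGetD (aAns n) i 0 + PySem.List.pyGetD p (i - 1) 0)))
    (PySem.List.pySetD ((PySem.List.pyRange 0 n 1).map (fun _ => (0 : Int))) 0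
      (PySem.List.pyGetD (aAns n) 0 0))

def solve (k : Int) (n : Int) : List Int :=
  ((PySem.List.pyRange (n - 1) (-1) (-1)).foldl
    (fun (st : List Int × Int) i =>
      if st.2 = k then st
      else if st.2 > k then
        if PySem.List.pyGetD (aPre n) i 0 > 0 ∧ PySem.List.pyGetD st.1 i 0 > 0 then
          (PySem.List.pySetD st.1 i (PySem.List.pyGetD st.1 i 0 * -1), st.2 - 1)
        else st
      else
        if PySem.List.pyGetD (aPre n) i 0 ≤ 0 ∧ PySem.List.pyGetD st.1 i 0 < 0 then
          (PySem.List.pySetD st.1 i (PySem.List.pyGetD st.1 i 0 * -1), st.2 + 1)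
        else st)
    (aAns n, PySem.Int.floordiv n 2)).1

-- ===== PORT B =====
def altM (n : Int) : Int := PySem.Int.floordiv n 2
def altE (n : Int) : Int := PySem.Int.floordiv (n + 1) 2
def altPosOdd (k : Int) (n : Int) : Int := if k ≥ altM n then altM n else max k 0
def altPosEven (k : Int) (n : Int) : Int := if k > altM n then min k n - altM n else 0

def solve_alt (k : Int) (n : Int) : List Int :=
  (PySem.List.pyRange 0 n 1).map (fun p =>
    if (PySem.Int.mod p 2 = 1 ∧ PySem.Int.floordiv p 2 < altPosOdd k n) ∨
       (PySem.Int.mod p 2 = 0 ∧ PySem.Int.floordiv p 2 ≥ altE n - altPosEven k n)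
    then p + 1 else -(p + 1))

-- ===== PRECONDITION & SPEC =====
-- Pre_ excludes n ≤ 0, where A raises IndexError (pre[0] = ans[0] on an empty list).
def Pre_solve (k : Int) (n : Int) : Prop := 1 ≤ n
instance (k : Int) (n : Int) : Decidable (Pre_solve k n) := by unfold Pre_solve; infer_instance
def pvWitness_solve : Int × Int := (1, 4)

def Spec_solve (k : Int) (n : Int) (out : List Int) : Prop := out = solve_alt k n
instance (k : Int) (n : Int) (out : List Int) : Decidable (Spec_solve k n out) := by unfold Spec_solve; infer_instance

-- ===== CLAIM =====
def Claim_equal_solve : Prop := ∀ (k : Int) (n : Int), Dom_solve k n → Pre_solve k n → Spec_solve k n (solve k n)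

-- ===== LEMMAS AND PROOFS =====

-- sign pattern after A's first loop: baseF j = -(j+1) for even j, (j+1) for odd j
def baseF (j : Nat) : Int := if j % 2 = 1 then (j : Int) + 1 else -((j : Int) + 1)
-- prefix sums of baseF
def preF (j : Nat) : Int := if j % 2 = 1 then ((j / 2 : Nat) : Int) + 1 else -(((j / 2 : Nat) : Int) + 1)

lemma getD_mr (N p : Nat) (f : Nat → Int) (hp : p < N) :
    ((List.range N).map f).getD p 0 = f p := by
  simp [List.getD_eq_getElem?_getD, hp]

lemma pyGetD_mr (N p : Nat) (f : Nat → Int) (hp : p < N) :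
    PySem.List.pyGetD ((List.range N).map f) ((p : Nat) : Int) 0 = f p := by
  rw [PySem.List.pyGetD_natCast]; exact getD_mr N p f hp

lemma set_mr (N p : Nat) (v : Int) (f g : Nat → Int) (hp : p < N)
    (hq : ∀ q, q < N → q ≠ p → f q = g q) (hv : v = g p) :
    ((List.range N).map f).set p v = (List.range N).map g := by
  apply List.ext_getElem (by simp)
  intro i h1 h2
  simp only [List.getElem_set, List.getElem_map, List.getElem_range]
  split_ifs with h
  · subst h; exact hv
  · exact hq i (by simpa using h2) (fun hc => h hc.symm)

lemma pyRange0 (N : Nat) :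
    PySem.List.pyRange 0 ((N : Nat) : Int) 1 = (List.range N).map (fun j : Nat => (j : Int)) := by
  rw [PySem.List.pyRange_one]; simp

lemma pyRange1 (N : Nat) :
    PySem.List.pyRange 1 (((N : Nat) : Int) + 1) 1 = (List.range N).map (fun j : Nat => 1 + (j : Int)) := by
  rw [PySem.List.pyRange_one]; simp

lemma pyRangeDown (N : Nat) :
    PySem.List.pyRange (((N : Nat) : Int) - 1) (-1) (-1)
      = ((List.range N).map (fun j : Nat => (j : Int))).reverse := by
  rw [PySem.List.pyRange_neg_one_eq_reverse]
  norm_num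
  rw [pyRange0 N]

lemma loop1 (N : Nat) : ∀ M, M ≤ N →
    (PySem.List.pyRange 0 ((M : Nat) : Int) 1).foldl
      (fun a i => if PySem.Int.mod i 2 ≠ 1 then
          PySem.List.pySetD a i (PySem.List.pyGetD a i 0 * -1) else a)
      ((List.range N).map (fun j : Nat => 1 + (j : Int)))
    = (List.range N).map (fun j => if j < M then baseF j else 1 + (j : Int)) := by
  intro M
  induction M with
  | zero =>
    intro _
    rw [show ((0 : Nat) : Int) = 0 by simp, PySem.List.pyRange_one_eq_nil le_rfl]
    simp only [List.foldl_nil]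
    exact List.map_congr_left (fun p _ => (if_neg (by omega)).symm)
  | succ M ih =>
    intro hM
    rw [show ((M + 1 : Nat) : Int) = ((M : Nat) : Int) + 1 by push_cast; ring,
        PySem.List.pyRange_one_succ_right (a := 0) (b := (M : Int)) (by omega), List.foldl_append, ih (by omega)]
    simp only [List.foldl_cons, List.foldl_nil]
    have hmod : PySem.Int.mod ((M : Nat) : Int) 2 = ((M % 2 : Nat) : Int) := by
      exact_mod_cast PySem.Int.mod_natCast M 2
    by_cases hp : M % 2 = 1
    · rw [if_neg (by rw [hmod]; omega)]
      apply List.map_congr_left; intro p hp2; simp only [List.mem_range] at hp2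
      by_cases hpe : p = M
      · subst hpe
        rw [if_neg (by omega), if_pos (by omega)]
        unfold baseF; rw [if_pos hp]; ring
      · have he : (p < M) ↔ (p < M + 1) := by omega
        simp only [he]
    · rw [if_pos (by rw [hmod]; omega)]
      rw [pyGetD_mr N M _ (by omega), if_neg (Nat.lt_irrefl M), PySem.List.pySetD_natCast]
      apply set_mr N M _ _ _ (by omega)
      · intro q hq hqm
        have he : (q < M) ↔ (q < M + 1) := by omega
        simp only [he]
      · rw [if_pos (by omega)]
        unfold baseF; rw [if_neg hp]; ring

lemma aAns_eq (N : Nat) : aAns ((N : Nat) : Int) = (List.range N).map baseF := by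
  unfold aAns
  rw [pyRange1 N, loop1 N N le_rfl]
  exact List.map_congr_left (fun p hp => by
    simp only [List.mem_range] at hp; exact if_pos hp)

lemma loop2 (N : Nat) : ∀ M, 1 ≤ M → M ≤ N →
    (PySem.List.pyRange 1 ((M : Nat) : Int) 1).foldl
      (fun p i => PySem.List.pySetD p i
        (PySem.List.pyGetD p i 0 +
          (PySem.List.pyGetD ((List.range N).map baseF) i 0 + PySem.List.pyGetD p (i - 1) 0)))
      ((List.range N).map (fun j => if j < 1 then preF j else 0))
    = (List.range N).map (fun j => if j < M then preF j else 0) := by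
  intro M
  induction M with
  | zero => intro h1 _; exact absurd h1 (by omega)
  | succ M ih =>
    intro _ hM
    by_cases hM1 : M = 0
    · subst hM1
      rw [show ((1 : Nat) : Int) = 1 by simp, PySem.List.pyRange_one_eq_nil le_rfl]
      norm_num
    · have h1M : 1 ≤ M := by omega
      rw [show ((M + 1 : Nat) : Int) = ((M : Nat) : Int) + 1 by push_cast; ring,
          PySem.List.pyRange_one_succ_right (a := 1) (b := (M : Int)) (by omega), List.foldl_append, ih h1M (by omega)]
      simp only [List.foldl_cons, List.foldl_nil]
      rw [show ((M : Nat) : Int) - 1 = ((M - 1 : Nat) : Int) by omega]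
      rw [pyGetD_mr N M _ (by omega), pyGetD_mr N M baseF (by omega),
          pyGetD_mr N (M - 1) _ (by omega)]
      rw [if_neg (Nat.lt_irrefl M), if_pos (by omega), PySem.List.pySetD_natCast]
      apply set_mr N M _ _ _ (by omega)
      · intro q hq hqm
        have he : (q < M) ↔ (q < M + 1) := by omega
        simp only [he]
      · rw [if_pos (by omega)]
        unfold baseF preF
        split_ifs <;> omega

lemma aPre_eq (N : Nat) (hN : 1 ≤ N) : aPre ((N : Nat) : Int) = (List.range N).map preF := by
  unfold aPre
  simp only [aAns_eq N]
  have h1 : (PySem.List.pyRange 0 ((N : Nat) : Int) 1).map (fun _ => (0 : Int))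
      = (List.range N).map (fun _ => (0 : Int)) := by
    rw [pyRange0 N, List.map_map]; rfl
  have h2 : PySem.List.pyGetD ((List.range N).map baseF) 0 0 = baseF 0 := by
    have := pyGetD_mr N 0 baseF (by omega); simpa using this
  have hset : ∀ (xs : List Int) (v : Int), PySem.List.pySetD xs 0 v = xs.set 0 v := by
    intro xs v
    rw [show (0 : Int) = ((0 : Nat) : Int) by simp, PySem.List.pySetD_natCast]
  rw [h1, h2, hset]
  have h3 : ((List.range N).map (fun _ => (0 : Int))).set 0 (baseF 0)
      = (List.range N).map (fun j => if j < 1 then preF j else 0) := by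
    apply set_mr N 0 _ _ _ (by omega)
    · intro q hq hq0; rw [if_neg (by omega)]
    · unfold baseF preF; norm_num
  rw [h3, loop2 N N hN le_rfl]
  exact List.map_congr_left (fun p hp => by
    simp only [List.mem_range] at hp; exact if_pos hp)

-- the backward loop with pre already rewritten to its closed form
def fA (k : Int) (N : Nat) : List Int × Int → Int → List Int × Int :=
  fun st i =>
    if st.2 = k then st
    else if st.2 > k then
      if PySem.List.pyGetD ((List.range N).map preF) i 0 > 0 ∧ PySem.List.pyGetD st.1 i 0 > 0 then
        (PySem.List.pySetD st.1 i (PySem.List.pyGetD st.1 i 0 * -1), st.2 - 1)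
      else st
    else
      if PySem.List.pyGetD ((List.range N).map preF) i 0 ≤ 0 ∧ PySem.List.pyGetD st.1 i 0 < 0 then
        (PySem.List.pySetD st.1 i (PySem.List.pyGetD st.1 i 0 * -1), st.2 + 1)
      else st

-- loop invariant, case k < n//2: odd ranks ≥ max(k,0) flipped from position j on
def finalL (k : Int) (N : Nat) (j : Nat) : List Int × Int :=
  ((List.range N).map (fun p =>
      if p % 2 = 1 ∧ j ≤ p ∧ k ≤ ((p / 2 : Nat) : Int) then -(baseF p) else baseF p),
   max k ((j / 2 : Nat) : Int))

-- loop invariant, case k > n//2: even ranks ≥ n - k flipped from position j on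
def finalG (k : Int) (N : Nat) (j : Nat) : List Int × Int :=
  ((List.range N).map (fun p =>
      if p % 2 = 0 ∧ j ≤ p ∧ (N : Int) - (((p / 2 : Nat) : Int) + 1) < k then -(baseF p) else baseF p),
   min k ((N : Int) - (((j + 1) / 2 : Nat) : Int)))

lemma revfold {σ : Type} (f : σ → Int → σ) (inv : Nat → σ) (N : Nat)
    (hstep : ∀ j, j < N → f (inv (j + 1)) ((j : Nat) : Int) = inv j) :
    ∀ M, M ≤ N → (((List.range M).map (fun j : Nat => (j : Int))).reverse).foldl f (inv M) = inv 0 := by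
  intro M
  induction M with
  | zero => intro _; simp
  | succ M ih =>
    intro hM
    rw [List.range_succ, List.map_append, List.reverse_append]
    simp only [List.map_cons, List.map_nil, List.reverse_cons, List.reverse_nil,
      List.nil_append, List.singleton_append, List.foldl_cons]
    rw [hstep M (by omega)]
    exact ih (by omega)

lemma stepL (k : Int) (N : Nat) (hk : k < ((N / 2 : Nat) : Int)) :
    ∀ j, j < N → fA k N (finalL k N (j + 1)) ((j : Nat) : Int) = finalL k N j := by
  intro j hj
  have hpre : PySem.List.pyGetD ((List.range N).map preF) ((j : Nat) : Int) 0 = preF j :=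
    pyGetD_mr N j preF hj
  have hans : PySem.List.pyGetD ((List.range N).map (fun p =>
      if p % 2 = 1 ∧ j + 1 ≤ p ∧ k ≤ ((p / 2 : Nat) : Int) then -(baseF p) else baseF p))
      ((j : Nat) : Int) 0 = baseF j := by
    rw [pyGetD_mr N j _ hj]; exact if_neg (by omega)
  unfold fA finalL
  dsimp only
  rw [hpre, hans]
  by_cases hc : max k (((j + 1) / 2 : Nat) : Int) = k
  · rw [if_pos hc]
    simp only [Prod.mk.injEq]
    constructor
    · apply List.map_congr_left; intro p hp; simp only [List.mem_range] at hp
      have he : (p % 2 = 1 ∧ j + 1 ≤ p ∧ k ≤ ((p / 2 : Nat) : Int))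
          ↔ (p % 2 = 1 ∧ j ≤ p ∧ k ≤ ((p / 2 : Nat) : Int)) := by omega
      simp only [he]
    · omega
  · rw [if_neg hc, if_pos (show max k (((j + 1) / 2 : Nat) : Int) > k by omega)]
    by_cases ho : j % 2 = 1
    · have hp1 : preF j > 0 := by unfold preF; rw [if_pos ho]; omega
      have hb1 : baseF j > 0 := by unfold baseF; rw [if_pos ho]; omega
      rw [if_pos ⟨hp1, hb1⟩]
      simp only [Prod.mk.injEq]
      constructor
      · rw [PySem.List.pySetD_natCast]
        apply set_mr N j _ _ _ hj
        · intro q hq hqj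
          have he : (q % 2 = 1 ∧ j + 1 ≤ q ∧ k ≤ ((q / 2 : Nat) : Int))
              ↔ (q % 2 = 1 ∧ j ≤ q ∧ k ≤ ((q / 2 : Nat) : Int)) := by omega
          simp only [he]
        · rw [if_pos ⟨ho, le_rfl, by omega⟩]; ring
      · omega
    · have hneg : ¬ (preF j > 0 ∧ baseF j > 0) := by
        rintro ⟨h1, _⟩; unfold preF at h1; rw [if_neg ho] at h1; omega
      rw [if_neg hneg]
      simp only [Prod.mk.injEq]
      constructor
      · apply List.map_congr_left; intro p hp; simp only [List.mem_range] at hp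
        have he : (p % 2 = 1 ∧ j + 1 ≤ p ∧ k ≤ ((p / 2 : Nat) : Int))
            ↔ (p % 2 = 1 ∧ j ≤ p ∧ k ≤ ((p / 2 : Nat) : Int)) := by omega
        simp only [he]
      · omega

lemma stepG (k : Int) (N : Nat) (hk : ((N / 2 : Nat) : Int) < k) :
    ∀ j, j < N → fA k N (finalG k N (j + 1)) ((j : Nat) : Int) = finalG k N j := by
  intro j hj
  have hpre : PySem.List.pyGetD ((List.range N).map preF) ((j : Nat) : Int) 0 = preF j :=
    pyGetD_mr N j preF hj
  have hans : PySem.List.pyGetD ((List.range N).map (fun p =>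
      if p % 2 = 0 ∧ j + 1 ≤ p ∧ (N : Int) - (((p / 2 : Nat) : Int) + 1) < k
      then -(baseF p) else baseF p)) ((j : Nat) : Int) 0 = baseF j := by
    rw [pyGetD_mr N j _ hj]; exact if_neg (by omega)
  unfold fA finalG
  dsimp only
  rw [hpre, hans]
  by_cases hc : min k ((N : Int) - (((j + 1 + 1) / 2 : Nat) : Int)) = k
  · rw [if_pos hc]
    simp only [Prod.mk.injEq]
    constructor
    · apply List.map_congr_left; intro p hp; simp only [List.mem_range] at hp
      have he : (p % 2 = 0 ∧ j + 1 ≤ p ∧ (N : Int) - (((p / 2 : Nat) : Int) + 1) < k)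
          ↔ (p % 2 = 0 ∧ j ≤ p ∧ (N : Int) - (((p / 2 : Nat) : Int) + 1) < k) := by omega
      simp only [he]
    · omega
  · rw [if_neg hc, if_neg (show ¬ min k ((N : Int) - (((j + 1 + 1) / 2 : Nat) : Int)) > k by omega)]
    by_cases ho : j % 2 = 1
    · have hneg : ¬ (preF j ≤ 0 ∧ baseF j < 0) := by
        rintro ⟨h1, _⟩; unfold preF at h1; rw [if_pos ho] at h1; omega
      rw [if_neg hneg]
      simp only [Prod.mk.injEq]
      constructor
      · apply List.map_congr_left; intro p hp; simp only [List.mem_range] at hp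
        have he : (p % 2 = 0 ∧ j + 1 ≤ p ∧ (N : Int) - (((p / 2 : Nat) : Int) + 1) < k)
            ↔ (p % 2 = 0 ∧ j ≤ p ∧ (N : Int) - (((p / 2 : Nat) : Int) + 1) < k) := by omega
        simp only [he]
      · omega
    · have hp1 : preF j ≤ 0 := by unfold preF; rw [if_neg ho]; omega
      have hb1 : baseF j < 0 := by unfold baseF; rw [if_neg ho]; omega
      rw [if_pos ⟨hp1, hb1⟩]
      simp only [Prod.mk.injEq]
      constructor
      · rw [PySem.List.pySetD_natCast]
        apply set_mr N j _ _ _ hj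
        · intro q hq hqj
          have he : (q % 2 = 0 ∧ j + 1 ≤ q ∧ (N : Int) - (((q / 2 : Nat) : Int) + 1) < k)
              ↔ (q % 2 = 0 ∧ j ≤ q ∧ (N : Int) - (((q / 2 : Nat) : Int) + 1) < k) := by omega
          simp only [he]
        · rw [if_pos ⟨by omega, le_rfl, by omega⟩]; ring
      · omega

lemma stepE (k : Int) (N : Nat) :
    ∀ j, j < N → fA k N ((List.range N).map baseF, k) ((j : Nat) : Int)
      = ((List.range N).map baseF, k) := by
  intro j _
  unfold fA
  dsimp only
  rw [if_pos rfl]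

lemma cast_mod2 (p : Nat) : PySem.Int.mod ((p : Nat) : Int) 2 = ((p % 2 : Nat) : Int) := by
  exact_mod_cast PySem.Int.mod_natCast p 2

lemma cast_div2 (p : Nat) : PySem.Int.floordiv ((p : Nat) : Int) 2 = ((p / 2 : Nat) : Int) := by
  exact_mod_cast PySem.Int.floordiv_natCast p 2

lemma cast_div2' (N : Nat) :
    PySem.Int.floordiv (((N : Nat) : Int) + 1) 2 = (((N + 1) / 2 : Nat) : Int) := by
  exact_mod_cast PySem.Int.floordiv_natCast (N + 1) 2

lemma finL (k : Int) (N : Nat) (hk : k < ((N / 2 : Nat) : Int)) :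
    (finalL k N 0).1 = solve_alt k ((N : Nat) : Int) := by
  unfold finalL solve_alt altPosOdd altPosEven altE altM
  dsimp only
  rw [pyRange0 N, List.map_map, cast_div2' N, cast_div2 N]
  rw [if_neg (show ¬ k ≥ ((N / 2 : Nat) : Int) by omega),
      if_neg (show ¬ k > ((N / 2 : Nat) : Int) by omega)]
  apply List.map_congr_left; intro p hp; simp only [List.mem_range] at hp
  simp only [Function.comp_apply, cast_mod2 p, cast_div2 p]
  unfold baseF
  split_ifs <;> omega

lemma finG (k : Int) (N : Nat) (hk : ((N / 2 : Nat) : Int) < k) :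
    (finalG k N 0).1 = solve_alt k ((N : Nat) : Int) := by
  unfold finalG solve_alt altPosOdd altPosEven altE altM
  dsimp only
  rw [pyRange0 N, List.map_map, cast_div2' N, cast_div2 N]
  rw [if_pos (show k ≥ ((N / 2 : Nat) : Int) by omega),
      if_pos (show k > ((N / 2 : Nat) : Int) by omega)]
  apply List.map_congr_left; intro p hp; simp only [List.mem_range] at hp
  simp only [Function.comp_apply, cast_mod2 p, cast_div2 p]
  unfold baseF
  split_ifs <;> omega

lemma finE (k : Int) (N : Nat) (hk : k = ((N / 2 : Nat) : Int)) :
    (List.range N).map baseF = solve_alt k ((N : Nat) : Int) := by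
  unfold solve_alt altPosOdd altPosEven altE altM
  rw [pyRange0 N, List.map_map, cast_div2' N, cast_div2 N]
  rw [if_pos (show k ≥ ((N / 2 : Nat) : Int) by omega),
      if_neg (show ¬ k > ((N / 2 : Nat) : Int) by omega)]
  apply List.map_congr_left; intro p hp; simp only [List.mem_range] at hp
  simp only [Function.comp_apply, cast_mod2 p, cast_div2 p]
  unfold baseF
  split_ifs <;> omega

theorem solve_eq_alt (k : Int) (N : Nat) (hN : 1 ≤ N) :
    solve k ((N : Nat) : Int) = solve_alt k ((N : Nat) : Int) := by
  have key : solve k ((N : Nat) : Int)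
      = ((((List.range N).map (fun j : Nat => (j : Int))).reverse).foldl (fA k N)
          ((List.range N).map baseF, ((N / 2 : Nat) : Int))).1 := by
    unfold solve
    rw [aAns_eq N, pyRangeDown N, cast_div2 N]
    simp only [aPre_eq N hN]
    rfl
  rw [key]
  rcases lt_trichotomy k ((N / 2 : Nat) : Int) with hk | hk | hk
  · have hinit : ((List.range N).map baseF, ((N / 2 : Nat) : Int)) = finalL k N N := by
      unfold finalL
      simp only [Prod.mk.injEq]
      constructor
      · exact (List.map_congr_left (fun p hp => by
          simp only [List.mem_range] at hp; exact if_neg (by omega))).symm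
      · omega
    rw [hinit, revfold (fA k N) (finalL k N) N (stepL k N hk) N le_rfl]
    exact finL k N hk
  · rw [← hk, revfold (fA k N) (fun _ => ((List.range N).map baseF, k)) N (stepE k N) N le_rfl]
    exact finE k N hk
  · have hinit : ((List.range N).map baseF, ((N / 2 : Nat) : Int)) = finalG k N N := by
      unfold finalG
      simp only [Prod.mk.injEq]
      constructor
      · exact (List.map_congr_left (fun p hp => by
          simp only [List.mem_range] at hp; exact if_neg (by omega))).symm
      · omega
    rw [hinit, revfold (fA k N) (finalG k N) N (stepG k N hk) N le_rfl]
    exact finG k N hk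

-- ===== VERDICT =====
theorem solve_spec : Claim_equal_solve := by
  intro k n _ hpre
  unfold Pre_solve at hpre
  unfold Spec_solve
  obtain ⟨N, rfl⟩ : ∃ N : Nat, n = ((N : Nat) : Int) :=
    ⟨n.toNat, (Int.toNat_of_nonneg (by omega)).symm⟩
  exact solve_eq_alt k N (by exact_mod_cast hpre)
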